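-- pv_equiv track=rewrite | github.com/jthampan/Malayalam_Church_Songs | Malayalam/generate_malayalam_hcs_ppt.py | split_text_for_slides
-- ===== SOURCE A (Python) =====
-- def split_text_for_slides(text):
--     """Split text into two parts, preferring stanza breaks."""
--     lines = text.splitlines()
--     if len(lines) <= 1:
--         return text, text
--
--     midpoint = len(lines) // 2
--     blank_indices = [i for i, line in enumerate(lines) if not line.strip()]
--     if blank_indices:
--         split_at = min(blank_indices, key=lambda i: abs(i - midpoint)) + 1
--         if split_at <= 0 or split_at >= len(lines):
--             split_at = midpoint
--     else:
--         split_at = midpoint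
--
--     first = "\n".join(lines[:split_at]).strip()
--     second = "\n".join(lines[split_at:]).strip()
--     return first, second
-- ===== SOURCE B (Python) =====
-- def split_text_for_slides(text):
--     """Split text into two parts, preferring stanza breaks.
--
--     Instead of collecting every blank-line index and minimising |i - midpoint|,
--     search outward from the midpoint (lower index first at each radius) and
--     stop at the first blank line found.
--     """
--     lines = text.splitlines()
--     n = len(lines)
--     if n <= 1:
--         return text, text
--
--     midpoint = n // 2
--     split_at = midpoint
--     for d in range(n):
--         i = midpoint - d
--         if 0 <= i < n and not lines[i].strip():
--             split_at = i + 1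
--             break
--         i = midpoint + d
--         if 0 <= i < n and not lines[i].strip():
--             split_at = i + 1
--             break
--     if split_at >= n:
--         split_at = midpoint
--
--     first = "\n".join(lines[:split_at]).strip()
--     second = "\n".join(lines[split_at:]).strip()
--     return first, second
-- ===== Notes on version B (the rewrite author's own statement) =====
-- stated objective: alternative
-- what changed: Replaces the collect-all-blank-indices-then-min-by-distance pass with an outward search from the midpoint (lower index first at each radius) that stops at the first blank line, reproducing min's first-minimum tie-break.
import Mathlib
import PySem

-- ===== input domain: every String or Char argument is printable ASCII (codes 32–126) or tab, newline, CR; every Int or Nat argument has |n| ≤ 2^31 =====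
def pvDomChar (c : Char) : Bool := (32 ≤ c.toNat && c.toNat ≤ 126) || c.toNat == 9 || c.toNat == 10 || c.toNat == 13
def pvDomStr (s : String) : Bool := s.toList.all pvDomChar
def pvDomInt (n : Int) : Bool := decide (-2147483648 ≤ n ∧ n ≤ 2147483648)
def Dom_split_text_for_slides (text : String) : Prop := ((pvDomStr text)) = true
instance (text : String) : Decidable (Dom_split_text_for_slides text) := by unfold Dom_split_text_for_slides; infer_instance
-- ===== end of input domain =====

-- B replaces A's collect-all-blank-indices-then-min-by-|i-midpoint| pass by an outward
-- search from the midpoint (lower index first at each radius); alternative algorithm, same values.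

-- ===== PORT A =====
-- A-side helper: [i for i, line in enumerate(lines) if not line.strip()]
def pvBlankIndices (lines : List String) : List Int :=
  ((PySem.List.enumerate lines 0).filter (fun p => PySem.Str.strip p.2 == "")).map Prod.fst

-- A-side helper: the whole 'split_at' computation (min over blank indices + range guard)
def pvSplitAtA (lines : List String) : Int :=
  let midpoint : Int := PySem.Int.floordiv (lines.length : Int) 2
  match PySem.List.min? (pvBlankIndices lines) (fun i => |i - midpoint|) with
  | some m => if m + 1 ≤ 0 ∨ m + 1 ≥ (lines.length : Int) then midpoint else m + 1
  | none => midpoint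

def split_text_for_slides (text : String) : String × String :=
  let lines := PySem.Str.splitlines text
  if lines.length ≤ 1 then (text, text)
  else
    let split_at := pvSplitAtA lines
    (PySem.Str.strip (PySem.Str.join "\n" (PySem.List.slice lines none (some split_at))),
     PySem.Str.strip (PySem.Str.join "\n" (PySem.List.slice lines (some split_at) none)))

-- ===== PORT B =====
-- B-side helper: '0 <= i < n and not lines[i].strip()' (the guard makes the index valid,
-- so pyGetD's default is never used)
def pvBlankAt (lines : List String) (i : Int) : Bool :=
  decide (0 ≤ i) && decide (i < (lines.length : Int)) &&
    (PySem.Str.strip (PySem.List.pyGetD lines i "") == "")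

-- B-side helper: the 'for d in range(n)' outward-search loop, fuel = number of radii left
def pvSearch (lines : List String) (midpoint : Int) : Int → Nat → Int
  | _, 0 => midpoint
  | d, fuel+1 =>
    if pvBlankAt lines (midpoint - d) then midpoint - d + 1
    else if pvBlankAt lines (midpoint + d) then midpoint + d + 1
    else pvSearch lines midpoint (d+1) fuel

-- B-side helper: the whole 'split_at' computation (outward search + range guard)
def pvSplitAtB (lines : List String) : Int :=
  let midpoint : Int := PySem.Int.floordiv (lines.length : Int) 2
  let s := pvSearch lines midpoint 0 lines.length
  if s ≥ (lines.length : Int) then midpoint else s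

def split_text_for_slides_alt (text : String) : String × String :=
  let lines := PySem.Str.splitlines text
  if lines.length ≤ 1 then (text, text)
  else
    let split_at := pvSplitAtB lines
    (PySem.Str.strip (PySem.Str.join "\n" (PySem.List.slice lines none (some split_at))),
     PySem.Str.strip (PySem.Str.join "\n" (PySem.List.slice lines (some split_at) none)))

-- ===== PRECONDITION & SPEC =====
def Spec_split_text_for_slides (text : String) (out : String × String) : Prop := out = split_text_for_slides_alt text
instance (text : String) (out : String × String) : Decidable (Spec_split_text_for_slides text out) := by unfold Spec_split_text_for_slides; infer_instance

-- ===== CLAIM (what is proved, stated in full; the proofs are below) =====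
def Claim_equal_split_text_for_slides : Prop := ∀ (text : String), Dom_split_text_for_slides text → Spec_split_text_for_slides text (split_text_for_slides text)

-- ===== LEMMAS AND PROOFS =====

-- pyGetD at a nonnegative index is List.getD
theorem pyGetD_at (lines : List String) (j : Int) (h0 : 0 ≤ j) :
    PySem.List.pyGetD lines j "" = lines.getD j.toNat "" := by
  rw [show j = (j.toNat : Int) by omega, PySem.List.pyGetD_natCast]
  simp
  rw [show (max j 0) = j from max_eq_left h0]

-- membership in A's blank-index list is exactly B's blank test
theorem mem_pvBlankIndices (lines : List String) (j : Int) :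
    j ∈ pvBlankIndices lines ↔ pvBlankAt lines j = true := by
  simp only [pvBlankIndices, pvBlankAt, List.mem_map, List.mem_filter,
    PySem.List.mem_enumerate_iff, Bool.and_eq_true, decide_eq_true_eq]
  constructor
  · rintro ⟨p, ⟨⟨k, hk, rfl⟩, hb⟩, rfl⟩
    simp only [zero_add] at hb ⊢
    refine ⟨⟨by omega, by exact_mod_cast hk⟩, ?_⟩
    rw [pyGetD_at lines (k : Int) (by omega)]
    rw [show ((k:Int).toNat) = k by omega, List.getD_eq_getElem _ _ hk]
    simpa using hb
  · rintro ⟨⟨h0, hlt⟩, hb⟩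
    refine ⟨(j, PySem.List.pyGetD lines j ""), ⟨⟨j.toNat, by omega, ?_⟩, hb⟩, rfl⟩
    rw [Prod.mk.injEq]
    refine ⟨by omega, ?_⟩
    rw [pyGetD_at lines j h0, List.getD_eq_getElem _ _ (by omega)]

-- the blank-index list is strictly increasing
theorem pairwise_pvBlankIndices (lines : List String) :
    (pvBlankIndices lines).Pairwise (· < ·) := by
  have h := PySem.List.pairwise_lt_enumerate (xs := lines) (s := 0)
  exact List.pairwise_map.mpr ((h.filter _))

-- the step function of PySem.List.min?
def pvMinStep (key : Int → Int) : Option Int → Int → Option Int :=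
  fun acc x => match acc with
    | none => some x
    | some m => if key x < key m then some x else some m

theorem min?_eq_foldl (key : Int → Int) (xs : List Int) :
    PySem.List.min? xs key = List.foldl (pvMinStep key) none xs := by
  unfold PySem.List.min?
  congr 1
  funext acc x
  cases acc <;> rfl

-- the min?-foldl invariant: continuing from 'some a' only ever lowers the key
theorem pvFoldlMin_inv (key : Int → Int) (xs : List Int) (a m : Int)
    (h : List.foldl (pvMinStep key) (some a) xs = some m) :
    key m ≤ key a ∧ (m = a ∨ key m < key a) := by
  induction xs generalizing a with
  | nil => simp_all
  | cons x xs ih =>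
    simp only [List.foldl_cons, pvMinStep] at h
    by_cases hx : key x < key a
    · rw [if_pos hx] at h
      obtain ⟨h1, h2⟩ := ih x h
      exact ⟨le_trans h1 (le_of_lt hx), Or.inr (by rcases h2 with rfl | h2 <;> omega)⟩
    · rw [if_neg hx] at h
      exact ih a h

-- min? returns the FIRST minimum; on a strictly increasing list that is the smallest index
theorem min?_tiebreak (key : Int → Int) (xs : List Int) (m j : Int)
    (hs : xs.Pairwise (· < ·)) (h : PySem.List.min? xs key = some m)
    (hj : j ∈ xs) (hk : key j = key m) : m ≤ j := by
  by_contra hc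
  push Not at hc
  obtain ⟨l, r, rfl⟩ := List.append_of_mem hj
  have hmem : m ∈ l ++ j :: r := PySem.List.min?_mem h
  have hpair := List.pairwise_append.mp (by simpa using hs : (l ++ [j] ++ r).Pairwise (· < ·))
  have hm_r : m ∈ r := by
    rcases List.mem_append.mp hmem with hml | hmjr
    · exact absurd (List.pairwise_append.mp hs |>.2.2 m hml j (List.mem_cons_self)) (by omega)
    · rcases List.mem_cons.mp hmjr with rfl | h'
      · omega
      · exact h'
  have hfold : PySem.List.min? (l ++ j :: r) key =
      List.foldl (pvMinStep key) (PySem.List.min? (l ++ [j]) key) r := by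
    rw [min?_eq_foldl, min?_eq_foldl, show l ++ j :: r = (l ++ [j]) ++ r by simp,
      List.foldl_append]
  obtain ⟨a, ha⟩ : ∃ a, PySem.List.min? (l ++ [j]) key = some a := by
    rcases hopt : PySem.List.min? (l ++ [j]) key with _ | a
    · exact absurd ((PySem.List.min?_eq_none_iff _ _).mp hopt) (by simp)
    · exact ⟨a, rfl⟩
  have haj : key a ≤ key j := PySem.List.min?_isMin ha j (by simp)
  have ham : a ∈ l ++ [j] := PySem.List.min?_mem ha
  have ha_lt : a < m := hpair.2.2 a ham m hm_r
  rw [hfold, ha] at h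
  obtain ⟨h1, h2⟩ := pvFoldlMin_inv key r a m h
  rcases h2 with rfl | h2
  · omega
  · omega

-- the outward search returns m + 1, for m the closest blank index (ties to the left)
theorem pvSearch_finds (lines : List String) (mid m : Int)
    (Hm : pvBlankAt lines m = true)
    (Hmin : ∀ j, pvBlankAt lines j = true → |m - mid| ≤ |j - mid|)
    (Htie : ∀ j, pvBlankAt lines j = true → |j - mid| = |m - mid| → m ≤ j) :
    ∀ (fuel : Nat) (d : Int), 0 ≤ d → d ≤ |m - mid| → |m - mid| < d + fuel →
      pvSearch lines mid d fuel = m + 1 := by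
  intro fuel
  induction fuel with
  | zero => intro d h0 h1 h2; omega
  | succ fuel ih =>
    intro d h0 h1 h2
    have habs : m - mid ≤ |m - mid| ∧ -(m - mid) ≤ |m - mid| ∧
        (|m - mid| = m - mid ∨ |m - mid| = -(m - mid)) :=
      ⟨le_abs_self _, neg_le_abs _, abs_choice _⟩
    rw [pvSearch]
    by_cases hb1 : pvBlankAt lines (mid - d) = true
    · rw [if_pos hb1]
      have h3 := Hmin _ hb1
      have h4 := Htie _ hb1
      rw [show |mid - d - mid| = d by
        rw [show mid - d - mid = -d by ring, abs_neg, abs_of_nonneg h0]] at h3 h4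
      have h5 := h4 (le_antisymm h1 h3)
      omega
    · rw [if_neg hb1]
      by_cases hb2 : pvBlankAt lines (mid + d) = true
      · rw [if_pos hb2]
        have h3 := Hmin _ hb2
        rw [show |mid + d - mid| = d by
          rw [show mid + d - mid = d by ring, abs_of_nonneg h0]] at h3
        have hd : |m - mid| = d := le_antisymm h3 h1
        have hm2 : m = mid - d ∨ m = mid + d := by omega
        rcases hm2 with rfl | rfl
        · exact absurd Hm hb1
        · rfl
      · rw [if_neg hb2]
        have hne : |m - mid| ≠ d := by
          intro hd
          have : m = mid - d ∨ m = mid + d := by omega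
          rcases this with rfl | rfl
          · exact hb1 Hm
          · exact hb2 Hm
        exact ih (d+1) (by omega) (by omega) (by omega)

-- with no blank line the search falls through to the midpoint
theorem pvSearch_none (lines : List String) (mid : Int)
    (H : ∀ j, pvBlankAt lines j = false) :
    ∀ (fuel : Nat) (d : Int), pvSearch lines mid d fuel = mid := by
  intro fuel
  induction fuel with
  | zero => intro d; rfl
  | succ fuel ih =>
    intro d
    rw [pvSearch, H, H]
    exact ih (d+1)

-- the two split-point computations agree on every list of lines
theorem pvSplitAt_eq (lines : List String) : pvSplitAtA lines = pvSplitAtB lines := by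
  unfold pvSplitAtA pvSplitAtB
  dsimp only
  have hmid : PySem.Int.floordiv (lines.length : Int) 2 = (lines.length : Int) / 2 := by
    rw [PySem.Int.floordiv, Int.fdiv_eq_ediv]
    simp
  generalize hMID : PySem.Int.floordiv (lines.length : Int) 2 = mid
  rw [hMID] at hmid
  rcases hmin : PySem.List.min? (pvBlankIndices lines) (fun i => |i - mid|) with _ | m
  · have hempty : pvBlankIndices lines = [] := (PySem.List.min?_eq_none_iff _ _).mp hmin
    have hnone : ∀ j, pvBlankAt lines j = false := by
      intro j
      by_contra h
      have h' : pvBlankAt lines j = true := by simpa using h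
      have := (mem_pvBlankIndices lines j).mpr h'
      rw [hempty] at this
      simp at this
    rw [pvSearch_none lines mid hnone lines.length 0]
    dsimp only
    split <;> rfl
  · have hmT : pvBlankAt lines m = true :=
      (mem_pvBlankIndices lines m).mp (PySem.List.min?_mem hmin)
    have hbounds : 0 ≤ m ∧ m < (lines.length : Int) := by
      have h' := hmT
      unfold pvBlankAt at h'
      simp only [Bool.and_eq_true, decide_eq_true_eq] at h'
      exact ⟨h'.1.1, h'.1.2⟩
    have hmin' : ∀ j, pvBlankAt lines j = true → |m - mid| ≤ |j - mid| := by
      intro j hj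
      exact PySem.List.min?_isMin hmin j ((mem_pvBlankIndices lines j).mpr hj)
    have htie : ∀ j, pvBlankAt lines j = true → |j - mid| = |m - mid| → m ≤ j := by
      intro j hj he
      exact min?_tiebreak (fun i => |i - mid|) (pvBlankIndices lines) m j
        (pairwise_pvBlankIndices lines) hmin ((mem_pvBlankIndices lines j).mpr hj) he
    have hmb : 0 ≤ mid ∧ mid < (lines.length : Int) := by
      omega
    have habs : |m - mid| = m - mid ∨ |m - mid| = -(m - mid) := abs_choice _
    have hsearch : pvSearch lines mid 0 lines.length = m + 1 :=
      pvSearch_finds lines mid m hmT hmin' htie lines.length 0 le_rfl (abs_nonneg _) (by omega)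
    dsimp only
    rw [hsearch]
    by_cases hge : m + 1 ≥ (lines.length : Int)
    · rw [if_pos (Or.inr hge), if_pos hge]
    · rw [if_neg (by omega), if_neg hge]

-- ===== VERDICT (by name: the statement is the Claim_ definition above) =====
theorem split_text_for_slides_spec : Claim_equal_split_text_for_slides := by
  intro text _
  unfold Spec_split_text_for_slides split_text_for_slides split_text_for_slides_alt
  by_cases hn : (PySem.Str.splitlines text).length ≤ 1
  · simp only [if_pos hn]
  · simp only [if_neg hn, pvSplitAt_eq]
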